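-- pv_equiv track=rewrite | github.com/ZhenningLang/you-get | src/you_get/extractors/youtube.py | chunk_by_range
-- ===== SOURCE A (Python) =====
-- def chunk_by_range(url, size):
--     urls = []
--     chunk_size = 10485760
--     start, end = 0, chunk_size - 1
--     urls.append('%s&range=%s-%s' % (url, start, end))
--     while end + 1 < size:  # processed size < expected size
--         start, end = end + 1, end + chunk_size
--         urls.append('%s&range=%s-%s' % (url, start, end))
--     return urls
-- ===== SOURCE B (Python) =====
-- def chunk_by_range(url, size):
--     chunk_size = 10485760
--     n = max(1, -(-size // chunk_size))
--     return ['%s&range=%s-%s' % (url, i * chunk_size, (i + 1) * chunk_size - 1)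
--             for i in range(n)]
-- ===== Notes on version B (the rewrite author's own statement) =====
-- stated objective: simpler
-- what changed: Replaces the while-loop advancing running start/end state with an up-front clamped ceiling-division chunk count and a single index-driven comprehension.
import Mathlib
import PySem

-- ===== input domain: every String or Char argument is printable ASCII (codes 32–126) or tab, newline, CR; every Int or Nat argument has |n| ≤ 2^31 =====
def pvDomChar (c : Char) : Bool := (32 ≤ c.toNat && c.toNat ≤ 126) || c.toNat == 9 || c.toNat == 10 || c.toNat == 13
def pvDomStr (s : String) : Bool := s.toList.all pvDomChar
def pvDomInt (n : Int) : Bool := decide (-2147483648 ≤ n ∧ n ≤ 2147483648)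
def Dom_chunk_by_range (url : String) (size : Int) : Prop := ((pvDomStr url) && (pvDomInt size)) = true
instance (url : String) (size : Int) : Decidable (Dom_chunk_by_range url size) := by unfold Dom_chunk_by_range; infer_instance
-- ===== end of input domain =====

-- B replaces A's running start/end while-loop by an up-front ceiling-division chunk count
-- (clamped to 1) and one indexed comprehension; objective: simpler.

-- shared format helper: '%s&range=%s-%s' % (url, start, end)
def pvChunkFmt (url : String) (s e : Int) : String :=
  url ++ "&range=" ++ PySem.Int.toStr s ++ "-" ++ PySem.Int.toStr e

-- ===== PORT A =====
-- the while-loop: state is `end`; appends while end + 1 < size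
def pvLoopA (url : String) (size : Int) (e : Int) : List String :=
  if _h : e + 1 < size then
    pvChunkFmt url (e + 1) (e + 10485760) :: pvLoopA url size (e + 10485760)
  else []
termination_by (size - e).toNat
decreasing_by omega

def chunk_by_range (url : String) (size : Int) : List String :=
  pvChunkFmt url 0 (10485760 - 1) :: pvLoopA url size (10485760 - 1)

-- ===== PORT B =====
def chunk_by_range_alt (url : String) (size : Int) : List String :=
  let chunk_size : Int := 10485760
  let n : Int := max 1 (-(PySem.Int.floordiv (-size) chunk_size))
  (PySem.List.pyRange 0 n 1).map
    (fun i => pvChunkFmt url (i * chunk_size) ((i + 1) * chunk_size - 1))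

-- ===== PRECONDITION & SPEC =====
def Spec_chunk_by_range (url : String) (size : Int) (out : List String) : Prop := out = chunk_by_range_alt url size
instance (url : String) (size : Int) (out : List String) : Decidable (Spec_chunk_by_range url size out) := by unfold Spec_chunk_by_range; infer_instance

-- ===== CLAIM (what is proved, stated in full; the proofs are below) =====
def Claim_equal_chunk_by_range : Prop := ∀ (url : String) (size : Int), Dom_chunk_by_range url size → Spec_chunk_by_range url size (chunk_by_range url size)

-- ===== LEMMAS AND PROOFS =====

-- the clamped ceiling chunk count B computes
def pvN (size : Int) : Int := max 1 (-(PySem.Int.floordiv (-size) 10485760))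

lemma pvN_iff (size k : Int) (hk : 1 ≤ k) : k * 10485760 < size ↔ k < pvN size := by
  have hb := (PySem.Int.neg_floordiv_neg_eq_iff_of_pos (a := size)
    (b := 10485760) (q := -(PySem.Int.floordiv (-size) 10485760)) (by norm_num)).mp rfl
  unfold pvN
  generalize hm : -(PySem.Int.floordiv (-size) 10485760) = m at hb ⊢
  omega

lemma pvLoopA_eq (url : String) (size : Int) (k : Int) (hk : 1 ≤ k) :
    pvLoopA url size (k * 10485760 - 1) =
      (PySem.List.pyRange k (pvN size) 1).map
        (fun i => pvChunkFmt url (i * 10485760) ((i + 1) * 10485760 - 1)) := by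
  rw [pvLoopA]
  by_cases h : k * 10485760 - 1 + 1 < size
  · rw [dif_pos h]
    have hkn : k < pvN size := (pvN_iff size k hk).mp (by omega)
    rw [PySem.List.pyRange_one_cons hkn, List.map_cons]
    have h1 : k * 10485760 - 1 + 1 = k * 10485760 := by ring
    have h2 : k * 10485760 - 1 + 10485760 = (k + 1) * 10485760 - 1 := by ring
    rw [h1, h2, pvLoopA_eq url size (k + 1) (by omega)]
  · rw [dif_neg h]
    have hkn : ¬ k < pvN size := fun hc => h (by have := (pvN_iff size k hk).mpr hc; omega)
    rw [PySem.List.pyRange_one_eq_nil (by omega), List.map_nil]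
termination_by (size - k * 10485760).toNat
decreasing_by omega

-- ===== VERDICT (by name: the statement is the Claim_ definition above) =====
theorem chunk_by_range_spec : Claim_equal_chunk_by_range := by
  intro url size _
  unfold Spec_chunk_by_range chunk_by_range chunk_by_range_alt
  have hn : (0 : Int) < pvN size := by unfold pvN; omega
  show _ = (PySem.List.pyRange 0 (pvN size) 1).map _
  rw [PySem.List.pyRange_one_cons hn, List.map_cons]
  congr 1
  rw [show ((0 : Int) + 1) = 1 from by norm_num,
    show ((10485760 : Int) - 1) = 1 * 10485760 - 1 from by norm_num]
  exact pvLoopA_eq url size 1 le_rfl
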